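-- pv_equiv track=rewrite | github.com/JonathanBechtel/draft-app | app/models/position_taxonomy.py | _tokenize_raw_position
-- ===== SOURCE A (Python) =====
-- from typing import List, Optional, Sequence
--
-- _BASE_ORDER = ["PG", "SG", "SF", "PF", "C", "G", "F"]
--
-- _BASE_NORMALIZATION = {
--     "PG": "PG",
--     "POINT": "PG",
--     "POINTGUARD": "PG",
--     "SG": "SG",
--     "SHOOTING": "SG",
--     "SHOOTINGGUARD": "SG",
--     "SF": "SF",
--     "SMALL": "SF",
--     "SMALLFORWARD": "SF",
--     "PF": "PF",
--     "POWER": "PF",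
--     "POWERFORWARD": "PF",
--     "C": "C",
--     "CENTER": "C",
--     "G": "G",
--     "GUARD": "G",
--     "F": "F",
--     "FORWARD": "F",
-- }
--
-- def _tokenize_raw_position(raw: str) -> List[str]:
--     # Normalize delimiters: " and " -> "-", "/" -> "-"
--     s = raw.replace(" and ", "-").replace("/", "-")
--     # Remove remaining spaces and uppercase
--     cleaned = s.replace(" ", "").upper()
--     tokens = [tok for tok in cleaned.split("-") if tok]
--     normalized: List[str] = []
--     for token in tokens:
--         canonical = _BASE_NORMALIZATION.get(token)
--         if canonical is None:
--             continue
--         normalized.append(canonical)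
--     if not normalized:
--         return []
--     unique: List[str] = []
--     for token in normalized:
--         if token not in unique:
--             unique.append(token)
--     order_index = {code: idx for idx, code in enumerate(_BASE_ORDER)}
--     unique.sort(key=lambda code: order_index.get(code, len(_BASE_ORDER)))
--     return unique
-- ===== SOURCE B (Python) =====
-- _BASE_ORDER = ["PG", "SG", "SF", "PF", "C", "G", "F"]
--
-- _BASE_NORMALIZATION = {
--     "PG": "PG", "POINT": "PG", "POINTGUARD": "PG",
--     "SG": "SG", "SHOOTING": "SG", "SHOOTINGGUARD": "SG",
--     "SF": "SF", "SMALL": "SF", "SMALLFORWARD": "SF",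
--     "PF": "PF", "POWER": "PF", "POWERFORWARD": "PF",
--     "C": "C", "CENTER": "C",
--     "G": "G", "GUARD": "G",
--     "F": "F", "FORWARD": "F",
-- }
--
-- def _tokenize_raw_position(raw: str):
--     # Same delimiter normalization, then: collect the SET of canonical codes and
--     # emit them by one filtered pass over _BASE_ORDER (inherently sorted & deduped).
--     s = raw.replace(" and ", "-").replace("/", "-")
--     cleaned = s.replace(" ", "").upper()
--     found = {_BASE_NORMALIZATION[t] for t in cleaned.split("-") if t in _BASE_NORMALIZATION}
--     return [code for code in _BASE_ORDER if code in found]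
-- ===== Notes on version B (the rewrite author's own statement) =====
-- stated objective: simpler
-- what changed: B collects the set of canonical codes from the tokens and emits them by one filtered pass over the fixed _BASE_ORDER list, eliminating A's preserve-order dedup loop, the order_index dict and the .sort call.
import Mathlib
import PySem

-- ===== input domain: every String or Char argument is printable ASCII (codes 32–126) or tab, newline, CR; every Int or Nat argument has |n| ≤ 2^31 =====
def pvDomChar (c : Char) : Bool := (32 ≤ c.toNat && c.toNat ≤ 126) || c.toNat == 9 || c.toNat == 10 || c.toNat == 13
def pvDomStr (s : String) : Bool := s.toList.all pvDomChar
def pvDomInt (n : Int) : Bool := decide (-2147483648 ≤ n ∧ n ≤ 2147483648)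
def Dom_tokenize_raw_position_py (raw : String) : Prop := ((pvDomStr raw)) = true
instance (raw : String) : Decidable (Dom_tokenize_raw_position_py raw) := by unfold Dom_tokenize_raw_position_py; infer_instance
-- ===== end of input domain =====

-- B replaces A's dedup loop, order_index dict and .sort by collecting the set of
-- canonical codes and filtering the fixed canonical order once (simpler decomposition).

-- module constants shared by A and B (same module in Python)
def pvBaseOrder : List String := ["PG","SG","SF","PF","C","G","F"]

def pvBaseNormalization : PySem.Dict String String := PySem.Dict.ofList
  [("PG","PG"),("POINT","PG"),("POINTGUARD","PG"),
   ("SG","SG"),("SHOOTING","SG"),("SHOOTINGGUARD","SG"),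
   ("SF","SF"),("SMALL","SF"),("SMALLFORWARD","SF"),
   ("PF","PF"),("POWER","PF"),("POWERFORWARD","PF"),
   ("C","C"),("CENTER","C"),
   ("G","G"),("GUARD","G"),
   ("F","F"),("FORWARD","F")]

-- ===== PORT A =====
def tokenize_raw_position_py (raw : String) : List String :=
  let s := PySem.Str.replace (PySem.Str.replace raw " and " "-") "/" "-"
  let cleaned := PySem.Str.upper (PySem.Str.replace s " " "")
  let tokens := ((PySem.Chars.splitOn cleaned.toList ['-']).map String.ofList).filter
      (fun tok => tok ≠ "")
  let normalized := tokens.foldl (fun acc token =>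
      match pvBaseNormalization.get? token with
      | none => acc
      | some canonical => acc ++ [canonical]) []
  if normalized = [] then []
  else
    let unique := normalized.foldl (fun acc token =>
        if acc.contains token then acc else acc ++ [token]) []
    let order_index : PySem.Dict String Int :=
      (PySem.List.enumerate pvBaseOrder).foldl (fun d p => d.insert p.2 p.1) PySem.Dict.empty
    PySem.List.sorted unique (fun code => order_index.getD code (pvBaseOrder.length : Int))

-- ===== PORT B =====
def tokenize_raw_position_py_alt (raw : String) : List String :=
  let s := PySem.Str.replace (PySem.Str.replace raw " and " "-") "/" "-"
  let cleaned := PySem.Str.upper (PySem.Str.replace s " " "")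
  let found : PySem.Set String :=
    PySem.Set.ofList (((PySem.Chars.splitOn cleaned.toList ['-']).map String.ofList).filterMap
      (fun t => pvBaseNormalization.get? t))
  pvBaseOrder.filter (fun code => PySem.Set.contains found code)

-- ===== PRECONDITION & SPEC =====
def Spec_tokenize_raw_position_py (raw : String) (out : List String) : Prop := out = tokenize_raw_position_py_alt raw
instance (raw : String) (out : List String) : Decidable (Spec_tokenize_raw_position_py raw out) := by unfold Spec_tokenize_raw_position_py; infer_instance

-- ===== CLAIM (what is proved, stated in full; the proofs are below) =====
def Claim_equal_tokenize_raw_position_py : Prop := ∀ (raw : String), Dom_tokenize_raw_position_py raw → Spec_tokenize_raw_position_py raw (tokenize_raw_position_py raw)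

-- ===== LEMMAS AND PROOFS =====

-- A's append loop over the dict lookups is filterMap of the lookup.
theorem pvFoldAppend (l : List String) (acc : List String) :
    l.foldl (fun acc token =>
      match pvBaseNormalization.get? token with
      | none => acc
      | some canonical => acc ++ [canonical]) acc
    = acc ++ l.filterMap (fun t => pvBaseNormalization.get? t) := by
  induction l generalizing acc with
  | nil => simp
  | cons x xs ih =>
    simp only [List.foldl_cons, List.filterMap_cons]
    cases h : pvBaseNormalization.get? x with
    | none => simp [ih]
    | some c => simp [ih]

-- dropping empty tokens does not change the lookups: "" is not a key.
theorem pvFilterMapFilter (l : List String) :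
    (l.filter (fun tok => tok ≠ "")).filterMap (fun t => pvBaseNormalization.get? t)
    = l.filterMap (fun t => pvBaseNormalization.get? t) := by
  induction l with
  | nil => rfl
  | cons x xs ih =>
    rw [List.filter_cons]
    by_cases hx : x = ""
    · rw [if_neg (by simp [hx])]
      rw [List.filterMap_cons, hx, (by decide : pvBaseNormalization.get? "" = none), ih]
    · rw [if_pos (by simp [hx]), List.filterMap_cons, List.filterMap_cons, ih]

-- every canonical value produced by the normalization dict is a code of pvBaseOrder.
theorem pvValueMem (t c : String) (h : pvBaseNormalization.get? t = some c) :
    c ∈ pvBaseOrder := by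
  have hmem := PySem.Dict.mem_items_of_get?_eq_some (d := pvBaseNormalization) h
  have : ∀ p ∈ pvBaseNormalization.items, p.2 ∈ pvBaseOrder := by decide
  exact this _ hmem

-- sorting a deduped list of codes by position in pvBaseOrder IS filtering pvBaseOrder.
theorem pvSortedEq (L : List String) (hL : ∀ x ∈ L, x ∈ pvBaseOrder) :
    PySem.List.sorted (PySem.Set.ofList L)
      (fun code => ((PySem.List.enumerate pvBaseOrder).foldl
          (fun d p => d.insert p.2 p.1) PySem.Dict.empty).getD code (pvBaseOrder.length : Int))
    = pvBaseOrder.filter (fun code => PySem.Set.contains (PySem.Set.ofList L) code) := by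
  apply PySem.List.sorted_eq_of_perm_of_pairwise_lt
  · rw [List.perm_ext_iff_of_nodup
      (List.Nodup.filter _ (by decide : pvBaseOrder.Nodup)) (PySem.Set.nodup_ofList L)]
    intro a
    simp only [List.mem_filter, PySem.Set.contains, List.contains_iff_mem]
    constructor
    · exact fun h => h.2
    · intro h
      exact ⟨hL a ((PySem.Set.mem_ofList L a).mp h), h⟩
  · exact List.Pairwise.filter _ (by decide)

-- ===== VERDICT (by name: the statement is the Claim_ definition above) =====
theorem tokenize_raw_position_py_spec : Claim_equal_tokenize_raw_position_py := by
  unfold Claim_equal_tokenize_raw_position_py Spec_tokenize_raw_position_py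
  intro raw _
  unfold tokenize_raw_position_py tokenize_raw_position_py_alt
  simp only [pvFoldAppend, List.nil_append, pvFilterMapFilter]
  set L := ((PySem.Chars.splitOn (PySem.Str.upper (PySem.Str.replace (PySem.Str.replace
      (PySem.Str.replace raw " and " "-") "/" "-") " " "")).toList ['-']).map
      String.ofList).filterMap (fun t => pvBaseNormalization.get? t) with hLdef
  by_cases h : L = []
  · rw [if_pos h, h]
    decide
  · rw [if_neg h]
    have hfold : L.foldl (fun acc token =>
        if acc.contains token then acc else acc ++ [token]) [] = PySem.Set.ofList L := by
      rw [PySem.Set.ofList_eq_foldl]; rfl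
    rw [hfold]
    apply pvSortedEq
    intro x hx
    rcases List.mem_filterMap.mp hx with ⟨t, _, ht⟩
    exact pvValueMem t x ht
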